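/- GENERATED by c/gen_decode.py: decode facts of the image, one per distinct instruction byte string. -/
import UserX.DecodeImage

#decode_all ProgX.Base.Dec
  "38c2"  -- cmp dl,al
  "4809f2"  -- or rdx,rsi
  "4885c0"  -- test rax,rax
  "4889f5"  -- mov rbp,rsi
  "48beffffffffffff0f00"  -- movabs rsi,0xfffffffffffff
  "4989fc"  -- mov r12,rdi
  "4c8d641b01"  -- lea r12,[rbx+rbx*1+0x1]
  "660f2fca"  -- comisd xmm1,xmm2
  "7407"  -- je 1004bb
  "7625"  -- jbe 1023bd
  "81ebfe070000"  -- sub ebx,0x7fe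
  "ba02000000"  -- mov edx,0x2
  "e832f8ffff"  -- call 100200
  "e8bb050000"  -- call 104100
  "eb09"  -- jmp 1024fb
  "f20f1005b1dc0300"  -- movsd xmm0,QWORD PTR [rip+0x3dcb1]
  "f20f58c0"  -- addsd xmm0,xmm0
  "f20f59da"  -- mulsd xmm3,xmm2
  "f20f5e1dbfda0300"  -- divsd xmm3,QWORD PTR [rip+0x3dabf]
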